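-- pv_equiv track=rewrite | github.com/besasam/advent-of-code | 2023/13/13-wip.py | parse
-- ===== SOURCE A (Python) =====
-- def parse(data):
--     def convert(line):
--         return int('0b' + ''.join(['1' if c == '#' else '0' for c in line]), 2)
--     res = []
--     for rows in data:
--         cols = list(zip(*rows[:]))
--         res.append({'rows': [convert(row) for row in rows], 'cols': [convert(col) for col in cols]})
--     return res
-- ===== SOURCE B (Python) =====
-- def parse(data):
--     res = []
--     for rows in data:
--         row_vals = []
--         for row in rows:
--             v = 0
--             for ch in row:
--                 v = 2 * v + (1 if ch == '#' else 0)
--             row_vals.append(v)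
--         ncols = min((len(r) for r in rows), default=0)
--         cols = [0] * ncols
--         for row in rows:
--             cols = [2 * c + (1 if ch == '#' else 0) for c, ch in zip(cols, row)]
--         res.append({'rows': row_vals, 'cols': cols})
--     return res
-- ===== Notes on version B (the rewrite author's own statement) =====
-- stated objective: alternative
-- what changed: Column bitmasks are built by scanning the rows once and updating per-column accumulators (col = 2*col + bit) instead of materialising the transpose with zip(*rows) and converting each column string; row bitmasks use a direct arithmetic fold instead of building a '0b...' string and int(...,2).
import Mathlib
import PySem

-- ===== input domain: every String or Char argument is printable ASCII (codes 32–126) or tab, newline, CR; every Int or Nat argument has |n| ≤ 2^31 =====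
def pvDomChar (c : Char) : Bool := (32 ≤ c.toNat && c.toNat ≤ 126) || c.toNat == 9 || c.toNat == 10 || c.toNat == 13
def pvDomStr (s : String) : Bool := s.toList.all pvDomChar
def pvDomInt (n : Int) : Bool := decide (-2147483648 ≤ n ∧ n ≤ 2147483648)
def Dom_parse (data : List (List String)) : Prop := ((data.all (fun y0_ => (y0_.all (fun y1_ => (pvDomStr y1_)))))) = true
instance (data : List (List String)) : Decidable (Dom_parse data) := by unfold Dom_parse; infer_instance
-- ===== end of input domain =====

-- B replaces A's transpose-then-convert column pass by per-column accumulators updated in one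
-- top-to-bottom row scan (objective: alternative decomposition, same cost).

-- ===== PORT A =====
-- min of the row lengths (0 for no rows): the length of Python's zip(*rows)
def minLen : List (List Char) → Nat
  | [] => 0
  | [r] => r.length
  | r :: s :: rest => min r.length (minLen (s :: rest))

-- exact port of the builtin zip(*rows): column j (j < min length) collects the j-th char of each row
def pyZip (rs : List (List Char)) : List (List Char) :=
  (List.range (minLen rs)).map (fun j => rs.map (fun row => row.getD j ' '))

-- int('0b' + ''.join('1' if c=='#' else '0' for c in line), 2): hand port, exact —
-- none = ValueError on the empty line, else the MSB-first base-2 value of the bit string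
def convertA (chars : List Char) : Option Int :=
  let bits := chars.map (fun c => if c = '#' then '1' else '0')
  if bits.isEmpty then none
  else some (bits.foldl (fun acc b => 2 * acc + (if b = '1' then (1 : Int) else 0)) 0)

-- the .getD 0 is reached only where Python raises ValueError; Pre_parse excludes those inputs
def parse (data : List (List String)) : List (List (String × List Int)) :=
  data.map (fun rows =>
    let cols := pyZip (rows.map String.toList)
    [("rows", rows.map (fun row => (convertA row.toList).getD 0)),
     ("cols", cols.map (fun col => (convertA col).getD 0))])

-- ===== PORT B =====
def hashBit (ch : Char) : Int := if ch = '#' then 1 else 0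

-- one row's accumulator update: cols = [2*c + bit for c, ch in zip(cols, row)]
def stepB (cols : List Int) (row : List Char) : List Int :=
  (cols.zip row).map (fun p => 2 * p.1 + hashBit p.2)

def parse_alt (data : List (List String)) : List (List (String × List Int)) :=
  data.map (fun rows =>
    let rowVals := rows.map (fun row => row.toList.foldl (fun v ch => 2 * v + hashBit ch) 0)
    let ncols := minLen (rows.map String.toList)
    let cols := rows.foldl (fun cs row => stepB cs row.toList) (List.replicate ncols 0)
    [("rows", rowVals), ("cols", cols)])

-- ===== PRECONDITION & SPEC =====
-- Pre_ excludes grids containing an empty line, on which A's int('0b', 2) raises ValueError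
def Pre_parse (data : List (List String)) : Prop := ∀ grid ∈ data, ∀ row ∈ grid, row ≠ ""
instance (data : List (List String)) : Decidable (Pre_parse data) := by unfold Pre_parse; infer_instance
def pvWitness_parse : List (List String) := [["#.", ".#"], ["##"]]

def Spec_parse (data : List (List String)) (out : List (List (String × List Int))) : Prop := out = parse_alt data
instance (data : List (List String)) (out : List (List (String × List Int))) : Decidable (Spec_parse data out) := by unfold Spec_parse; infer_instance

-- ===== CLAIM (what is proved, stated in full; the proofs are below) =====
def Claim_equal_parse : Prop := ∀ (data : List (List String)), Dom_parse data → Pre_parse data → Spec_parse data (parse data)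

-- ===== LEMMAS AND PROOFS =====

lemma convertA_ne_nil (l : List Char) (h : l ≠ []) :
    (convertA l).getD 0 = l.foldl (fun v ch => 2 * v + hashBit ch) 0 := by
  unfold convertA
  simp only [List.isEmpty_iff, List.map_eq_nil_iff]
  rw [if_neg h]
  simp only [Option.getD_some, List.foldl_map]
  congr 1
  funext v c
  by_cases hc : c = '#' <;> simp [hc, hashBit]

lemma minLen_le : ∀ (L : List (List Char)), ∀ l ∈ L, minLen L ≤ l.length
  | [], l, hl => by cases hl
  | [r], l, hl => by simp at hl; subst hl; simp [minLen]
  | r :: s :: rest, l, hl => by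
    rw [List.mem_cons] at hl
    rcases hl with h | h
    · subst h; simp only [minLen]; exact min_le_left _ _
    · exact le_trans (by simp only [minLen]; exact min_le_right _ _)
        (minLen_le (s :: rest) l h)

lemma stepB_getD (acc : List Int) (l : List Char) (j : Nat) (hj : j < acc.length)
    (hl : acc.length ≤ l.length) :
    (stepB acc l).getD j 0 = 2 * acc.getD j 0 + hashBit (l.getD j ' ') := by
  have hjl : j < l.length := lt_of_lt_of_le hj hl
  have hz : j < (acc.zip l).length := by simp [List.length_zip]; omega
  simp [stepB, List.getD_eq_getElem?_getD, hj, hjl]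

lemma foldB_char (L : List (List Char)) (acc : List Int)
    (H : ∀ l ∈ L, acc.length ≤ l.length) :
    L.foldl stepB acc =
      (List.range acc.length).map
        (fun j => L.foldl (fun v l => 2 * v + hashBit (l.getD j ' ')) (acc.getD j 0)) := by
  induction L generalizing acc with
  | nil =>
    simp only [List.foldl_nil]
    refine List.ext_getElem (by simp) ?_
    intro i h1 h2
    simp [List.getD_eq_getElem?_getD, h1]
  | cons l L' ih =>
    have hl : acc.length ≤ l.length := H l (by simp)
    have hlen : (stepB acc l).length = acc.length := by
      simp [stepB, List.length_zip]; omega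
    rw [List.foldl_cons, ih (stepB acc l) (by intro x hx; rw [hlen]; exact H x (by simp [hx])),
      hlen]
    apply List.map_congr_left
    intro j hj
    rw [List.mem_range] at hj
    rw [stepB_getD acc l j hj hl, List.foldl_cons]

lemma grid_eq (rows : List String) (hpre : ∀ row ∈ rows, row ≠ "") :
    (let cols := pyZip (rows.map String.toList)
     [("rows", rows.map (fun row => (convertA row.toList).getD 0)),
      ("cols", cols.map (fun col => (convertA col).getD 0))] :
      List (String × List Int)) =
    [("rows", rows.map (fun row => row.toList.foldl (fun v ch => 2 * v + hashBit ch) 0)),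
     ("cols", rows.foldl (fun cs row => stepB cs row.toList)
        (List.replicate (minLen (rows.map String.toList)) 0))] := by
  have hrows : rows.map (fun row => (convertA row.toList).getD 0)
      = rows.map (fun row => row.toList.foldl (fun v ch => 2 * v + hashBit ch) 0) := by
    apply List.map_congr_left
    intro row hr
    exact convertA_ne_nil _ (by simpa [String.toList_eq_nil_iff] using hpre row hr)
  set L := rows.map String.toList with hL
  have hfold : rows.foldl (fun cs row => stepB cs row.toList)
      (List.replicate (minLen L) 0) = L.foldl stepB (List.replicate (minLen L) 0) := by
    rw [hL, List.foldl_map]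
  have hcols : (pyZip L).map (fun col => (convertA col).getD 0)
      = L.foldl stepB (List.replicate (minLen L) 0) := by
    rw [foldB_char L _ (by intro l hl; simpa using minLen_le L l hl)]
    simp only [List.length_replicate]
    unfold pyZip
    rw [List.map_map]
    apply List.map_congr_left
    intro j hj
    simp only [Function.comp_apply]
    rcases hLc : L with _ | ⟨l0, L'⟩
    · rw [hLc] at hj; simp [minLen] at hj
    · have hne : (l0 :: L').map (fun row => row.getD j ' ') ≠ [] := by simp
      rw [convertA_ne_nil _ hne, List.foldl_map]
      congr 1
      simp only [List.getD_eq_getElem?_getD, List.getElem?_replicate]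
      split <;> rfl
  simp only [hrows, hfold, hcols]

-- ===== VERDICT (by name: the statement is the Claim_ definition above) =====
theorem parse_spec : Claim_equal_parse := by
  intro data _ hpre
  unfold Spec_parse parse parse_alt
  apply List.map_congr_left
  intro rows hr
  exact grid_eq rows (hpre rows hr)
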